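-- pv_equiv track=rewrite | github.com/Tusenka/hackerrank | coins.py | _build_coins
-- ===== SOURCE A (Python) =====
-- def _build_coins(a: tuple, i: int):
--     if len(a)==0:
--         yield 0, 0
--         return
--     if i == len(a) - 1:
--         yield 0, 0
--         yield a[-1], 1
--         yield a[-1] * 2, 2
--         return
--     for x in _build_coins(a, i + 1):
--         yield x[0], x[1]
--         yield x[0] + a[i], x[1] + 1
--         yield x[0] + 2 * a[i], x[1] + 2
-- ===== SOURCE B (Python) =====
-- def _build_coins(a: tuple, i: int):
--     if len(a) == 0:
--         yield 0, 0
--         return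
--     result = [(0, 0), (a[-1], 1), (a[-1] * 2, 2)]
--     for k in reversed(range(i, len(a) - 1)):
--         c = a[k]
--         result = [p for q in result
--                     for p in ((q[0], q[1]), (q[0] + c, q[1] + 1), (q[0] + 2 * c, q[1] + 2))]
--     yield from result
-- ===== Notes on version B (the rewrite author's own statement) =====
-- stated objective: alternative
-- what changed: Replaced the nested generator recursion with a single iterative fold: start from the base combinations [(0,0),(a[-1],1),(2*a[-1],2)] and, for each coin a[k] with k running from len(a)-2 down to i, expand every pair into its three variants in A's exact order.
import Mathlib
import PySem

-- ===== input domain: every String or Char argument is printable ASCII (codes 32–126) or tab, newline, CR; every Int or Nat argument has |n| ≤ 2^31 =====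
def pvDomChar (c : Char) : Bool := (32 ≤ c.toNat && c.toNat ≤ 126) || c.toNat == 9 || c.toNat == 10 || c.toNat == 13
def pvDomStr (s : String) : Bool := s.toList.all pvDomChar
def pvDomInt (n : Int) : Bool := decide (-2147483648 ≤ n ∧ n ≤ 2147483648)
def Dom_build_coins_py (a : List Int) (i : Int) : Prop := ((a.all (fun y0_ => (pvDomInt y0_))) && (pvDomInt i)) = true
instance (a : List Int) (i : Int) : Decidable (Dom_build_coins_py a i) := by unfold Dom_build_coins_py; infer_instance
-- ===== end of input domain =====

-- B replaces A's nested generator recursion by one iterative fold over the coins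
-- (objective: simpler/alternative; same output list, same order and multiplicity).

-- ===== PORT A =====
-- literal port of A's recursion; the final 'else []' branch covers i > len(a)-1,
-- where the Python recurses forever (RecursionError) — excluded by Pre_.
def build_coins_py (a : List Int) (i : Int) : List (Int × Int) :=
  if _h0 : a.length = 0 then [(0, 0)]
  else if i = (a.length : Int) - 1 then
    match PySem.List.pyGet? a (-1) with
    | some last => [(0, 0), (last, 1), (last * 2, 2)]
    | none => []      -- unreachable: a nonempty
  else if _h : i < (a.length : Int) - 1 then
    (build_coins_py a (i + 1)).flatMap (fun x =>
      match PySem.List.pyGet? a i with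
      | some c => [(x.1, x.2), (x.1 + c, x.2 + 1), (x.1 + 2 * c, x.2 + 2)]
      | none => [])   -- IndexError in Python (i < -len); excluded by Pre_
  else []
termination_by ((a.length : Int) - 1 - i).toNat
decreasing_by omega

-- ===== PORT B =====
def build_coins_py_alt (a : List Int) (i : Int) : List (Int × Int) :=
  if a.length = 0 then [(0, 0)]
  else
    let last := (PySem.List.pyGet? a (-1)).getD 0
    (PySem.List.pyRange i ((a.length : Int) - 1) 1).reverse.foldl
      (fun res k =>
        let c := (PySem.List.pyGet? a k).getD 0   -- IndexError in Python iff k < -len; excluded by Pre_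
        res.flatMap (fun q => [(q.1, q.2), (q.1 + c, q.2 + 1), (q.1 + 2 * c, q.2 + 2)]))
      [(0, 0), (last, 1), (last * 2, 2)]

-- ===== PRECONDITION & SPEC =====
-- Pre_ excludes only inputs where Python A raises: i < -len(a) (IndexError) and,
-- for nonempty a, i ≥ len(a) (unbounded recursion, RecursionError).
def Pre_build_coins_py (a : List Int) (i : Int) : Prop :=
  a = [] ∨ (-(a.length : Int) ≤ i ∧ i < (a.length : Int))
instance (a : List Int) (i : Int) : Decidable (Pre_build_coins_py a i) := by
  unfold Pre_build_coins_py; infer_instance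
def pvWitness_build_coins_py : List Int × Int := ([1, 2, 3], 0)

def Spec_build_coins_py (a : List Int) (i : Int) (out : List (Int × Int)) : Prop := out = build_coins_py_alt a i
instance (a : List Int) (i : Int) (out : List (Int × Int)) : Decidable (Spec_build_coins_py a i out) := by unfold Spec_build_coins_py; infer_instance

-- ===== CLAIM (what is proved, stated in full; the proofs are below) =====
def Claim_equal_build_coins_py : Prop := ∀ (a : List Int) (i : Int), Dom_build_coins_py a i → Pre_build_coins_py a i → Spec_build_coins_py a i (build_coins_py a i)

-- ===== LEMMAS AND PROOFS =====

theorem pyGet?_some_of_inrange (a : List Int) (i : Int)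
    (h1 : -(a.length : Int) ≤ i) (h2 : i < (a.length : Int)) :
    ∃ c, PySem.List.pyGet? a i = some c := by
  cases h : PySem.List.pyGet? a i with
  | some c => exact ⟨c, rfl⟩
  | none =>
    rw [PySem.List.pyGet?_eq_none_iff] at h
    exact absurd ⟨h1, h2⟩ h

theorem build_coins_main (n : Nat) :
    ∀ (a : List Int) (i : Int), a.length ≠ 0 →
      -(a.length : Int) ≤ i → i < (a.length : Int) →
      ((a.length : Int) - 1 - i).toNat = n →
      build_coins_py a i = build_coins_py_alt a i := by
  induction n with
  | zero =>
    intro a i h0 _h1 h2 hn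
    have hi : i = (a.length : Int) - 1 := by omega
    obtain ⟨last, hlast⟩ := pyGet?_some_of_inrange a (-1) (by omega) (by omega)
    rw [build_coins_py]
    simp only [dif_neg h0, hi, hlast]
    rw [build_coins_py_alt, if_neg h0,
      PySem.List.pyRange_one_eq_nil (by omega : (a.length : Int) - 1 ≤ (a.length : Int) - 1)]
    simp [hlast]
  | succ n ih =>
    intro a i h0 h1 h2 hn
    have hlt : i < (a.length : Int) - 1 := by omega
    have hne : i ≠ (a.length : Int) - 1 := by omega
    obtain ⟨c, hc⟩ := pyGet?_some_of_inrange a i h1 h2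
    have hIH : build_coins_py a (i + 1) = build_coins_py_alt a (i + 1) :=
      ih a (i + 1) h0 (by omega) (by omega) (by omega)
    rw [build_coins_py]
    simp only [dif_neg h0, if_neg hne, dif_pos hlt, hc, hIH]
    conv_rhs => rw [build_coins_py_alt]
    rw [if_neg h0, PySem.List.pyRange_one_cons (by omega : i < (a.length : Int) - 1),
      List.reverse_cons, List.foldl_append]
    conv_lhs => rw [build_coins_py_alt]
    rw [if_neg h0]
    simp only [List.foldl_cons, List.foldl_nil, hc, Option.getD_some]

-- ===== VERDICT (by name: the statement is the Claim_ definition above) =====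
theorem build_coins_py_spec : Claim_equal_build_coins_py := by
  intro a i _hd hpre
  unfold Spec_build_coins_py
  rcases hpre with hnil | ⟨h1, h2⟩
  · subst hnil; rw [build_coins_py]; rfl
  · have h0 : a.length ≠ 0 := by omega
    exact build_coins_main ((a.length : Int) - 1 - i).toNat a i h0 h1 h2 rfl
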